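-- pv_equiv track=rewrite | github.com/expoolleet/pi-tracking-stream-receiver | src/roi_handler.py | get_optimal_roi_size
-- ===== SOURCE A (Python) =====
-- OPTIMAL_ROI_SQUARE_SIZES = [32, 36, 40, 42, 45, 48, 49, 50, 54, 56, 60, 64, 72, 75, 80, 81, 84, 90, 96, 100, 108, 112, 120, 125, 126, 128]
--
-- def get_optimal_roi_size(size, index_offset) -> int:
--     min_difference = 9999
--     optimal_size_index = 0
--     for i, optimal_size in enumerate(OPTIMAL_ROI_SQUARE_SIZES):
--         difference = abs(size - optimal_size)
--         if difference < min_difference: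
--             min_difference = difference
--             optimal_size_index = i
--     if optimal_size_index + index_offset < 0:
--         return OPTIMAL_ROI_SQUARE_SIZES[0]
--     elif optimal_size_index + index_offset >= len(OPTIMAL_ROI_SQUARE_SIZES):
--         return OPTIMAL_ROI_SQUARE_SIZES[-1]
--     return OPTIMAL_ROI_SQUARE_SIZES[optimal_size_index + index_offset]
-- ===== SOURCE B (Python) =====
-- OPTIMAL_ROI_SQUARE_SIZES = [32, 36, 40, 42, 45, 48, 49, 50, 54, 56, 60, 64, 72, 75, 80, 81, 84, 90, 96, 100, 108, 112, 120, 125, 126, 128]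
--
-- def get_optimal_roi_size(size, index_offset) -> int:
--     sizes = OPTIMAL_ROI_SQUARE_SIZES
--     n = len(sizes)
--     # binary search for the insertion point of `size` (bisect_left, by hand)
--     lo, hi = 0, n
--     while lo < hi:
--         mid = (lo + hi) // 2
--         if sizes[mid] < size:
--             lo = mid + 1
--         else:
--             hi = mid
--     # pick the nearest neighbour, ties towards the lower index
--     if lo == 0:
--         idx = 0
--     elif lo == n:
--         idx = n - 1
--     elif size - sizes[lo - 1] <= sizes[lo] - size:
--         idx = lo - 1
--     else:
--         idx = lo
--     j = idx + index_offset
--     if j < 0: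
--         return sizes[0]
--     if j >= n:
--         return sizes[-1]
--     return sizes[j]
-- ===== Notes on version B (the rewrite author's own statement) =====
-- stated objective: alternative
-- what changed: Replaced the full linear min-scan over the 26 ROI sizes with a hand-written binary search (bisect_left) plus a neighbour comparison that breaks ties toward the lower index, keeping the identical offset clamp.
-- intended difference: For size >= 10127 every |size - optimal| reaches A's 9999 sentinel, so A never updates and clamps from index 0 (returning 32 or OPTIMAL[offset]); B returns the genuinely nearest size 128 (index 25, clamped); with |index_offset| <= 24 the two clamped results actually differ, and B's nearest-value answer is the intended one. — e.g. on get_optimal_roi_size(10127, 0): A returns 32, B returns 128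
import Mathlib
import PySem

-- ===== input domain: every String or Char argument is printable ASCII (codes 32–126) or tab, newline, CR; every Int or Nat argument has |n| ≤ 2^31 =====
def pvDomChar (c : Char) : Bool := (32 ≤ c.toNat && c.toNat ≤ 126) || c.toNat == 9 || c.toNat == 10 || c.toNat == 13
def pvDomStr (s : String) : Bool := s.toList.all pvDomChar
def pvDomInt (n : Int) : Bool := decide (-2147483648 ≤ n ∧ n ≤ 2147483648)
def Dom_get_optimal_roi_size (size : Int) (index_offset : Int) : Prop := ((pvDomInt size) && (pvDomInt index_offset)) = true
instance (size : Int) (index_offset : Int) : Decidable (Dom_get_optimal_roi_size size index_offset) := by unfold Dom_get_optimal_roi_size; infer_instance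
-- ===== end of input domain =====

-- B replaces A's linear min-scan by a hand-written binary search plus a neighbour
-- comparison (ties toward the lower index); on size ≥ 10127 A's 9999 sentinel makes A
-- clamp from index 0 while B returns the genuinely nearest size (see D_ below).

-- ===== PORT A =====
def pvROI : List Int := [32, 36, 40, 42, 45, 48, 49, 50, 54, 56, 60, 64, 72, 75, 80, 81, 84, 90, 96, 100, 108, 112, 120, 125, 126, 128]

-- one step of A's loop: state = (min_difference, optimal_size_index)
def pvStepA (size : Int) (st : Int × Int) (p : Int × Int) : Int × Int :=
  if |size - p.2| < st.1 then (|size - p.2|, p.1) else st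

-- A's loop: first index of minimal |size - optimal_size| (9999 sentinel included)
def pvAidx (size : Int) : Int :=
  ((PySem.List.enumerate pvROI).foldl (pvStepA size) (9999, 0)).2

def get_optimal_roi_size (size : Int) (index_offset : Int) : Int :=
  if pvAidx size + index_offset < 0 then (PySem.List.pyGet? pvROI 0).getD 0
  else if pvAidx size + index_offset ≥ (pvROI.length : Int) then (PySem.List.pyGet? pvROI (-1)).getD 0
  else (PySem.List.pyGet? pvROI (pvAidx size + index_offset)).getD 0

-- ===== PORT B =====
-- Source B's while-loop (bisect_left by hand); fuel only makes the recursion structural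
def pvBisectLeft (size : Int) : Nat → Nat → Nat → Nat
  | 0, lo, _ => lo
  | fuel+1, lo, hi =>
    if lo < hi then
      if (PySem.List.pyGet? pvROI (((lo + hi) / 2 : Nat) : Int)).getD 0 < size then
        pvBisectLeft size fuel ((lo + hi) / 2 + 1) hi
      else
        pvBisectLeft size fuel lo ((lo + hi) / 2)
    else lo

-- Source B's neighbour comparison: nearest index, ties toward the lower index
def pvNearestIdx (size : Int) : Int :=
  let lo := pvBisectLeft size pvROI.length 0 pvROI.length
  if lo = 0 then 0
  else if lo = pvROI.length then (pvROI.length : Int) - 1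
  else if size - (PySem.List.pyGet? pvROI ((lo : Int) - 1)).getD 0 ≤ (PySem.List.pyGet? pvROI (lo : Int)).getD 0 - size then (lo : Int) - 1
  else (lo : Int)

def get_optimal_roi_size_alt (size : Int) (index_offset : Int) : Int :=
  if pvNearestIdx size + index_offset < 0 then (PySem.List.pyGet? pvROI 0).getD 0
  else if pvNearestIdx size + index_offset ≥ (pvROI.length : Int) then (PySem.List.pyGet? pvROI (-1)).getD 0
  else (PySem.List.pyGet? pvROI (pvNearestIdx size + index_offset)).getD 0

-- ===== PRECONDITION & SPEC =====
-- For size ≥ 10127 every |size - optimal| reaches A's 9999 sentinel, so A never updates and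
-- clamps from index 0 (returning 32 or OPTIMAL[offset]); B returns the genuinely nearest size
-- 128 (index 25, clamped); with |index_offset| ≤ 24 the two clamped results actually differ,
-- and B's nearest-value answer is the intended one.
def D_get_optimal_roi_size (size : Int) (index_offset : Int) : Prop :=
  10127 ≤ size ∧ -24 ≤ index_offset ∧ index_offset ≤ 24
instance (size : Int) (index_offset : Int) : Decidable (D_get_optimal_roi_size size index_offset) := by
  unfold D_get_optimal_roi_size; infer_instance

def Spec_get_optimal_roi_size (size : Int) (index_offset : Int) (out : Int) : Prop :=
  ¬ D_get_optimal_roi_size size index_offset → out = get_optimal_roi_size_alt size index_offset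
instance (size : Int) (index_offset : Int) (out : Int) : Decidable (Spec_get_optimal_roi_size size index_offset out) := by
  unfold Spec_get_optimal_roi_size; infer_instance

def pvDiffWitness_get_optimal_roi_size : Int × Int := (10127, 0)
def pvDiffWitnessOut_get_optimal_roi_size : Int × Int := (32, 128)

-- ===== CLAIM (what is proved, stated in full; the proofs are below) =====
def Claim_unchanged_get_optimal_roi_size : Prop := ∀ (size : Int) (index_offset : Int), Dom_get_optimal_roi_size size index_offset → Spec_get_optimal_roi_size size index_offset (get_optimal_roi_size size index_offset)
def Claim_changed_get_optimal_roi_size : Prop := Dom_get_optimal_roi_size (pvDiffWitness_get_optimal_roi_size.1) (pvDiffWitness_get_optimal_roi_size.2) ∧ D_get_optimal_roi_size (pvDiffWitness_get_optimal_roi_size.1) (pvDiffWitness_get_optimal_roi_size.2) ∧ get_optimal_roi_size (pvDiffWitness_get_optimal_roi_size.1) (pvDiffWitness_get_optimal_roi_size.2) = pvDiffWitnessOut_get_optimal_roi_size.1 ∧ get_optimal_roi_size_alt (pvDiffWitness_get_optimal_roi_size.1) (pvDiffWitness_get_optimal_roi_size.2) = pvDiffWitnessOut_get_optimal_roi_size.2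 ∧ pvDiffWitnessOut_get_optimal_roi_size.1 ≠ pvDiffWitnessOut_get_optimal_roi_size.2
def Claim_exact_get_optimal_roi_size : Prop := ∀ (size : Int) (index_offset : Int), Dom_get_optimal_roi_size size index_offset → D_get_optimal_roi_size size index_offset → get_optimal_roi_size size index_offset ≠ get_optimal_roi_size_alt size index_offset

-- ===== LEMMAS AND PROOFS =====

-- A's fold leaves the state alone when nothing beats the current minimum
lemma pv_no_update (size : Int) (l : List (Int × Int)) :
    ∀ st : Int × Int, (∀ p ∈ l, st.1 ≤ |size - p.2|) → l.foldl (pvStepA size) st = st := by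
  induction l with
  | nil => intro st _; rfl
  | cons p l ih =>
    intro st h
    have h1 : pvStepA size st p = st := by
      unfold pvStepA; rw [if_neg (not_lt.2 (h p (List.mem_cons_self)))]
    rw [List.foldl_cons, h1]
    exact ih st (fun q hq => h q (List.mem_cons_of_mem _ hq))

-- over a strictly improving chain, the fold ends at the last element (if it beats st)
lemma pv_desc_last (size : Int) (l : List (Int × Int)) :
    ∀ q : Int × Int, l.getLast? = some q →
      l.Pairwise (fun a b => |size - b.2| < |size - a.2|) →
      ∀ st : Int × Int,
        l.foldl (pvStepA size) st = if |size - q.2| < st.1 then (|size - q.2|, q.1) else st := by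
  induction l with
  | nil => intro q hq; simp at hq
  | cons p l ih =>
    intro q hq hpw st
    cases l with
    | nil =>
      simp at hq; subst hq
      simp [List.foldl, pvStepA]
    | cons r l' =>
      have hq' : (r :: l').getLast? = some q := by
        simpa [List.getLast?_cons_cons] using hq
      have hmem : ∀ b ∈ r :: l', |size - b.2| < |size - p.2| := (List.pairwise_cons.1 hpw).1
      have hpw' := (List.pairwise_cons.1 hpw).2
      have hqmem : q ∈ r :: l' := List.mem_of_getLast? hq'
      rw [List.foldl_cons]
      by_cases h : |size - p.2| < st.1
      · rw [show pvStepA size st p = (|size - p.2|, p.1) from by unfold pvStepA; rw [if_pos h]]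
        rw [ih q hq' hpw' _]
        have hlt : |size - q.2| < |size - p.2| := hmem q hqmem
        rw [if_pos hlt, if_pos (lt_trans hlt h)]
      · rw [show pvStepA size st p = st from by unfold pvStepA; rw [if_neg h]]
        exact ih q hq' hpw' st

lemma pv_enum : PySem.List.enumerate pvROI =
    [((0:Int),(32:Int)),(1,36),(2,40),(3,42),(4,45),(5,48),(6,49),(7,50),(8,54),(9,56),(10,60),(11,64),(12,72),(13,75),(14,80),(15,81),(16,84),(17,90),(18,96),(19,100),(20,108),(21,112),(22,120),(23,125),(24,126),(25,128)] := by
  decide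

lemma pvAidx_small (size : Int) (h : size ≤ 32) : pvAidx size = 0 := by
  unfold pvAidx
  rw [pv_enum, List.foldl_cons]
  by_cases hc : |size - (32:Int)| < 9999
  · rw [show pvStepA size (9999, 0) (0, 32) = (|size - 32|, 0) from by
      unfold pvStepA; rw [if_pos (by simpa using hc)]]
    rw [pv_no_update size _ _ (by
      intro p hp
      fin_cases hp <;>
        rw [abs_of_nonpos (by omega : size - 32 ≤ 0), abs_of_nonpos (by omega)] <;> omega)]
  · rw [show pvStepA size (9999, 0) (0, 32) = (9999, 0) from by
      unfold pvStepA; rw [if_neg (by simpa using hc)]]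
    rw [abs_of_nonpos (by omega : size - 32 ≤ 0)] at hc
    rw [pv_no_update size _ _ (by
      intro p hp
      fin_cases hp <;> rw [abs_of_nonpos (by omega)] <;> omega)]

lemma pvAidx_big (size : Int) (h : 128 ≤ size) :
    pvAidx size = if size ≤ 10126 then 25 else 0 := by
  unfold pvAidx
  rw [pv_enum]
  have h2 : ([((0:Int),(32:Int)),(1,36),(2,40),(3,42),(4,45),(5,48),(6,49),(7,50),(8,54),(9,56),(10,60),(11,64),(12,72),(13,75),(14,80),(15,81),(16,84),(17,90),(18,96),(19,100),(20,108),(21,112),(22,120),(23,125),(24,126),(25,128)] :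
      List (Int × Int)).Pairwise (fun a b => a.2 < b.2 ∧ b.2 ≤ 128) := by decide
  rw [pv_desc_last size _ (25, 128) (by decide)
      (h2.imp (fun {a b} hab => by
        rw [abs_of_nonneg (by omega : (0:Int) ≤ size - b.2),
            abs_of_nonneg (by omega : (0:Int) ≤ size - a.2)]
        omega)) (9999, 0)]
  rw [abs_of_nonneg (by omega : (0:Int) ≤ size - (25, (128:Int)).2)]
  by_cases h3 : size ≤ 10126
  · rw [if_pos (by simp; omega), if_pos h3]
  · rw [if_neg (by simp; omega), if_neg h3]

lemma pv_bl_step (size : Int) (fuel lo hi : Nat) :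
    pvBisectLeft size (fuel+1) lo hi =
      (if lo < hi then
        if (PySem.List.pyGet? pvROI (((lo + hi) / 2 : Nat) : Int)).getD 0 < size then
          pvBisectLeft size fuel ((lo + hi) / 2 + 1) hi
        else
          pvBisectLeft size fuel lo ((lo + hi) / 2)
      else lo) := rfl

-- binary search stays at lo when every table entry is ≥ size
lemma pv_bl_ge (size : Int) (hall : ∀ k : Nat, k < 26 → size ≤ (PySem.List.pyGet? pvROI (k : Int)).getD 0) :
    ∀ (fuel lo hi : Nat), hi ≤ 26 → pvBisectLeft size fuel lo hi = lo := by
  intro fuel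
  induction fuel with
  | zero => intro lo hi _; rfl
  | succ f ih =>
    intro lo hi hhi
    rw [pv_bl_step]
    by_cases hlt : lo < hi
    · rw [if_pos hlt, if_neg (not_lt.2 (hall ((lo + hi) / 2) (by omega)))]
      exact ih lo ((lo + hi) / 2) (by omega)
    · rw [if_neg hlt]

-- binary search reaches hi when every table entry is < size
lemma pv_bl_lt (size : Int) (hall : ∀ k : Nat, k < 26 → (PySem.List.pyGet? pvROI (k : Int)).getD 0 < size) :
    ∀ (fuel lo hi : Nat), hi ≤ 26 → lo ≤ hi → hi - lo ≤ fuel → pvBisectLeft size fuel lo hi = hi := by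
  intro fuel
  induction fuel with
  | zero =>
    intro lo hi _ hle hf
    have heq : lo = hi := by omega
    rw [heq]
    rfl
  | succ f ih =>
    intro lo hi hhi hle hf
    rw [pv_bl_step]
    by_cases hlt : lo < hi
    · rw [if_pos hlt, if_pos (hall ((lo + hi) / 2) (by omega))]
      exact ih ((lo + hi) / 2 + 1) hi hhi (by omega) (by omega)
    · rw [if_neg hlt]; omega

lemma pvROI_elems_ge (size : Int) (h : size ≤ 32) :
    ∀ k : Nat, k < 26 → size ≤ (PySem.List.pyGet? pvROI (k : Int)).getD 0 := by
  intro k hk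
  interval_cases k <;> simp [pvROI, PySem.List.pyGet?, PySem.List.pyIdx?] <;> omega

lemma pvROI_elems_lt (size : Int) (h : 129 ≤ size) :
    ∀ k : Nat, k < 26 → (PySem.List.pyGet? pvROI (k : Int)).getD 0 < size := by
  intro k hk
  interval_cases k <;> simp [pvROI, PySem.List.pyGet?, PySem.List.pyIdx?] <;> omega

lemma pvNearestIdx_small (size : Int) (h : size ≤ 32) : pvNearestIdx size = 0 := by
  unfold pvNearestIdx
  rw [pv_bl_ge size (pvROI_elems_ge size h) pvROI.length 0 pvROI.length (by decide)]
  rfl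

lemma pvNearestIdx_big (size : Int) (h : 129 ≤ size) : pvNearestIdx size = 25 := by
  unfold pvNearestIdx
  rw [pv_bl_lt size (pvROI_elems_lt size h) pvROI.length 0 pvROI.length (by decide) (by decide) (by decide)]
  rfl

set_option maxRecDepth 20000 in
lemma pv_idx_mid (size : Int) (h1 : 33 ≤ size) (h2 : size ≤ 128) :
    pvAidx size = pvNearestIdx size := by
  interval_cases size <;> decide

-- ===== VERDICT (by name: the statement is the Claim_ definition above) =====
theorem get_optimal_roi_size_spec : Claim_unchanged_get_optimal_roi_size := by
  intro size index_offset _ hnd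
  unfold get_optimal_roi_size get_optimal_roi_size_alt
  by_cases c1 : size ≤ 32
  · rw [pvAidx_small size c1, pvNearestIdx_small size c1]
  · by_cases c2 : size ≤ 128
    · rw [pv_idx_mid size (by omega) c2]
    · by_cases c3 : size ≤ 10126
      · rw [show pvAidx size = 25 from by rw [pvAidx_big size (by omega), if_pos c3],
            pvNearestIdx_big size (by omega)]
      · have hA : pvAidx size = 0 := by rw [pvAidx_big size (by omega), if_neg c3]
        have hB : pvNearestIdx size = 25 := pvNearestIdx_big size (by omega)
        have hoff : index_offset ≤ -25 ∨ 25 ≤ index_offset := by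
          unfold D_get_optimal_roi_size at hnd; omega
        rw [hA, hB, show ((pvROI.length : Nat) : Int) = 26 from rfl]
        rcases hoff with h | h
        · by_cases he : index_offset = -25
          · subst he; decide
          · split_ifs <;> first | rfl | omega
        · by_cases he : index_offset = 25
          · subst he; decide
          · split_ifs <;> first | rfl | omega

set_option maxRecDepth 100000 in
theorem get_optimal_roi_size_changed : Claim_changed_get_optimal_roi_size := by
  unfold Claim_changed_get_optimal_roi_size; decide

set_option maxRecDepth 100000 in
theorem get_optimal_roi_size_tight : Claim_exact_get_optimal_roi_size := by
  intro size index_offset _ hd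
  obtain ⟨hs, ho1, ho2⟩ := hd
  unfold get_optimal_roi_size get_optimal_roi_size_alt
  rw [show pvAidx size = 0 from by rw [pvAidx_big size (by omega), if_neg (by omega)],
      pvNearestIdx_big size (by omega)]
  interval_cases index_offset <;> decide
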